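-- pv_equiv track=rewrite | github.com/davewalters/parts-browser | client_code/PBOMTemplateList/__init__.py | _latest_only
-- ===== SOURCE A (Python) =====
-- def _latest_only(rows):
--   # Keep highest rev per parent_part_id (lexicographic)
--   by_parent = {}
--   for r in rows:
--     p = r.get("parent_part_id","")
--     cur = by_parent.get(p)
--     if cur is None:
--       by_parent[p] = r
--     else:
--       if (r.get("rev","") or "") >= (cur.get("rev","") or ""):
--         by_parent[p] = r
--   # Stable-ish order: by parent_part_id then rev
--   return sorted(by_parent.values(), key=lambda x: (x.get("parent_part_id",""), x.get("rev","")))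
-- ===== SOURCE B (Python) =====
-- def _latest_only(rows):
--   # Sort once by (parent, rev); a stable sort puts each parent's rows together
--   # with the highest rev (last-wins on ties) at the end of its run, so one
--   # scan keeping the last row of each run yields the result already in order.
--   ordered = sorted(rows, key=lambda r: (r.get("parent_part_id",""), r.get("rev","")))
--   out = []
--   for r in ordered:
--     if out and out[-1].get("parent_part_id","") == r.get("parent_part_id",""):
--       out[-1] = r
--     else:
--       out.append(r)
--   return out
-- ===== Notes on version B (the rewrite author's own statement) =====
-- stated objective: alternative
-- what changed: Replaces A's dict-of-best-rows pass followed by a final sort with a single stable sort by (parent, rev) followed by one linear scan that keeps the last row of each consecutive equal-parent run.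
import Mathlib
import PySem

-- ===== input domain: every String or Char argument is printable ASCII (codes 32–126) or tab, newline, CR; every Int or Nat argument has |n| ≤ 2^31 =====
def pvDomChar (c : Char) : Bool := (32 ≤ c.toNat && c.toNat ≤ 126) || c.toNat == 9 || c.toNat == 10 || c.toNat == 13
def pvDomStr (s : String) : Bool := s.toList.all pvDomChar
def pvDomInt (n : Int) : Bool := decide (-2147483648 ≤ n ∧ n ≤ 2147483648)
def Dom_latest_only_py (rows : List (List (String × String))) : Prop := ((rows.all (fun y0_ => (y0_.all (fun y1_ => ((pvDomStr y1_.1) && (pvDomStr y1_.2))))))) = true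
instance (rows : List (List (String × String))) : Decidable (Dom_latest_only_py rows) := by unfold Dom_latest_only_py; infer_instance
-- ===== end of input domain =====

-- B replaces A's dict-of-best-rows pass plus final sort by one stable sort on
-- (parent, rev) followed by a single scan keeping the last row of each
-- consecutive equal-parent run (objective: alternative, same asymptotic cost).

-- ===== PORT A =====
-- r.get(key, "") on a dict row (rows are association lists; first match wins)
def pvGet (r : List (String × String)) (k : String) : String :=
  PySem.Dict.getD (PySem.Dict.mk r) k ""

-- Python's (s or "") on a string
def pvOr (s : String) : String := if s = "" then "" else s

-- the body of A's 'for r in rows' loop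
def pvAStep (by_parent : PySem.Dict String (List (String × String)))
    (r : List (String × String)) : PySem.Dict String (List (String × String)) :=
  let p := pvGet r "parent_part_id"
  match by_parent.get? p with
  | none => by_parent.insert p r
  | some cur =>
      if pvOr (pvGet cur "rev") ≤ pvOr (pvGet r "rev") then by_parent.insert p r
      else by_parent

def latest_only_py (rows : List (List (String × String))) : List (List (String × String)) :=
  let by_parent := rows.foldl pvAStep PySem.Dict.empty
  PySem.List.sorted2 by_parent.values (fun x => pvGet x "parent_part_id") (fun x => pvGet x "rev")

-- ===== PORT B =====
-- the body of B's 'for r in ordered' loop: replace the last kept row on an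
-- equal parent, else append
def pvBStep (out : List (List (String × String)))
    (r : List (String × String)) : List (List (String × String)) :=
  match out.getLast? with
  | none => out ++ [r]
  | some last =>
      if pvGet last "parent_part_id" == pvGet r "parent_part_id" then out.dropLast ++ [r]
      else out ++ [r]

def latest_only_py_alt (rows : List (List (String × String))) : List (List (String × String)) :=
  let ordered := PySem.List.sorted2 rows (fun r => pvGet r "parent_part_id") (fun r => pvGet r "rev")
  ordered.foldl pvBStep []

-- ===== PRECONDITION & SPEC =====
def Spec_latest_only_py (rows : List (List (String × String))) (out : List (List (String × String))) : Prop := out = latest_only_py_alt rows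
instance (rows : List (List (String × String))) (out : List (List (String × String))) : Decidable (Spec_latest_only_py rows out) := by unfold Spec_latest_only_py; infer_instance

-- ===== CLAIM (what is proved, stated in full; the proofs are below) =====
def Claim_equal_latest_only_py : Prop := ∀ (rows : List (List (String × String))), Dom_latest_only_py rows → Spec_latest_only_py rows (latest_only_py rows)

-- ===== LEMMAS AND PROOFS =====

-- proof-side abbreviations
def pvPk (r : List (String × String)) : String := pvGet r "parent_part_id"
def pvRk (r : List (String × String)) : String := pvGet r "rev"
def pvK (r : List (String × String)) : Lex (String × String) := toLex (pvPk r, pvRk r)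
def pvBefore (a b : List (String × String)) : Bool := decide (pvK a < pvK b)
def pvIns (x : List (String × String)) (l : List (List (String × String))) :
    List (List (String × String)) := PySem.List.insertBy pvBefore x l
def pvBGroup : List (String × String) → List (List (String × String)) → List (List (String × String))
  | r, [] => [r]
  | r, s :: t => if pvPk s = pvPk r then pvBGroup s t else r :: pvBGroup s t
def pvBest (c : List (String × String)) (t : List (List (String × String))) : List (String × String) :=
  t.foldl (fun cur r => if pvRk cur ≤ pvRk r then r else cur) c
def pvUpd (o : Option (List (String × String))) (r : List (String × String)) :
    Option (List (String × String)) :=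
  match o with
  | none => some r
  | some c => some (if pvRk c ≤ pvRk r then r else c)
def pvBestO (l : List (List (String × String))) : List (String × String) :=
  (l.foldl pvUpd none).getD []
def pvSel (p : String) (l : List (List (String × String))) : List (List (String × String)) :=
  l.filter (fun r => pvPk r == p)

theorem pvOr_eq (s : String) : pvOr s = s := by
  by_cases h : s = "" <;> simp [pvOr, h]

theorem pv_sorted2_eq {α : Type} (xs : List α) (k1 k2 : α → String) :
    PySem.List.sorted2 xs k1 k2 = PySem.List.sorted xs (fun x => toLex (k1 x, k2 x)) := by
  unfold PySem.List.sorted2 PySem.List.sorted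
  simp only [if_neg (by decide : ¬ (false = true))]
  have hbe : (fun (a b : α) => decide (k1 a < k1 b) || (!decide (k1 b < k1 a) && decide (k2 a < k2 b)))
      = fun a b => decide ((toLex (k1 a, k2 a)) < toLex (k1 b, k2 b)) := by
    funext a b
    rw [Bool.eq_iff_iff]
    simp only [Bool.or_eq_true, Bool.and_eq_true, Bool.not_eq_true', decide_eq_true_eq,
      decide_eq_false_iff_not, Prod.Lex.lt_iff, ofLex_toLex]
    constructor
    · rintro (h1 | ⟨h2, h3⟩)
      · exact Or.inl h1
      · rcases lt_trichotomy (k1 a) (k1 b) with h | h | h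
        · exact Or.inl h
        · exact Or.inr ⟨h, h3⟩
        · exact absurd h h2
    · rintro (h1 | ⟨h2, h3⟩)
      · exact Or.inl h1
      · exact Or.inr ⟨by rw [h2]; exact lt_irrefl _, h3⟩
  rw [hbe]

theorem pv_pairwise_insertBy (x : List (String × String)) (l : List (List (String × String)))
    (h : l.Pairwise (fun a b => pvK a ≤ pvK b)) :
    (pvIns x l).Pairwise (fun a b => pvK a ≤ pvK b) := by
  induction l with
  | nil => simp [pvIns, PySem.List.insertBy]
  | cons y ys ih =>
    rcases List.pairwise_cons.mp h with ⟨hy, hys⟩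
    by_cases hc : pvBefore x y = true
    · simp only [pvIns, PySem.List.insertBy, hc, if_true]
      refine List.pairwise_cons.mpr ⟨?_, h⟩
      intro b hb
      have hxy : pvK x < pvK y := of_decide_eq_true hc
      rcases List.mem_cons.mp hb with rfl | hb
      · exact le_of_lt hxy
      · exact le_trans (le_of_lt hxy) (hy b hb)
    · simp only [pvIns, PySem.List.insertBy, hc]
      refine List.pairwise_cons.mpr ⟨?_, ih hys⟩
      intro b hb
      rcases (PySem.List.mem_insertBy _ _ _ _).mp hb with rfl | hb
      · exact not_lt.mp (by simpa [pvBefore] using hc)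
      · exact hy b hb

theorem pv_insertBy_eq_cons (x : List (String × String)) (m : List (List (String × String)))
    (h : ∀ z ∈ m, pvBefore x z = true) : pvIns x m = x :: m := by
  cases m with
  | nil => simp [pvIns, PySem.List.insertBy]
  | cons y ys => simp [pvIns, PySem.List.insertBy, h y (by simp)]

theorem pv_getLast?_insertBy (l : List (List (String × String))) (x y : List (String × String))
    (hl : l.getLast? = some y) (hxy : pvBefore x y = true) :
    (pvIns x l).getLast? = some y := by
  induction l generalizing y with
  | nil => simp at hl
  | cons a l ih =>
    by_cases hc : pvBefore x a = true
    · cases l with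
      | nil =>
        simp only [List.getLast?_singleton, Option.some.injEq] at hl
        subst hl
        simp [pvIns, PySem.List.insertBy, hc]
      | cons b l' =>
        simp only [pvIns, PySem.List.insertBy, hc, if_true]
        simpa [List.getLast?_cons_cons] using hl
    · cases l with
      | nil =>
        simp only [List.getLast?_singleton, Option.some.injEq] at hl
        subst hl
        simp only [pvBefore, decide_eq_true_eq] at hxy
        simp only [pvBefore, decide_eq_true_eq] at hc
        exact absurd hxy hc
      | cons b l' =>
        have hstep : pvIns x (a :: b :: l') = a :: pvIns x (b :: l') := by
          simp [pvIns, PySem.List.insertBy, hc]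
        rw [hstep]
        rw [List.getLast?_cons_cons] at hl
        have hrec := ih y hl hxy
        rcases hcons : pvIns x (b :: l') with _ | ⟨c, m⟩
        · have hx : x ∈ pvIns x (b :: l') := (PySem.List.mem_insertBy _ _ _ _).mpr (Or.inl rfl)
          rw [hcons] at hx
          simp at hx
        · rw [hcons] at hrec
          rw [List.getLast?_cons_cons]
          exact hrec

theorem pv_filter_insertBy (q : List (String × String) → Bool) (x : List (String × String))
    (l : List (List (String × String))) (h : l.Pairwise (fun a b => pvK a ≤ pvK b)) :
    (pvIns x l).filter q = if q x then pvIns x (l.filter q) else l.filter q := by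
  induction l with
  | nil => cases hq : q x <;> simp [pvIns, PySem.List.insertBy, hq]
  | cons y ys ih =>
    rcases List.pairwise_cons.mp h with ⟨hy, hys⟩
    by_cases hc : pvBefore x y = true
    · have hstep : pvIns x (y :: ys) = x :: y :: ys := by
        simp [pvIns, PySem.List.insertBy, hc]
      rw [hstep]
      by_cases hq : q x
      · by_cases hqy : q y
        · simp [hq, hqy, pvIns, PySem.List.insertBy, hc]
        · have hall : ∀ z ∈ ys.filter q, pvBefore x z = true := by
            intro z hz
            have hz' : z ∈ ys := List.mem_of_mem_filter hz
            have hxz : pvK x < pvK z := lt_of_lt_of_le (of_decide_eq_true hc) (hy z hz')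
            exact decide_eq_true hxz
          rw [List.filter_cons_of_pos hq, List.filter_cons_of_neg hqy]
          rw [if_pos hq, pv_insertBy_eq_cons x _ hall]
      · simp [hq]
    · have hstep : pvIns x (y :: ys) = y :: pvIns x ys := by
        simp [pvIns, PySem.List.insertBy, hc]
      rw [hstep]
      have ihh := ih hys
      by_cases hq : q x
      · rw [if_pos hq] at ihh ⊢
        by_cases hqy : q y
        · rw [List.filter_cons_of_pos hqy, List.filter_cons_of_pos hqy, ihh]
          have hstep2 : pvIns x (y :: ys.filter q) = y :: pvIns x (ys.filter q) := by
            simp [pvIns, PySem.List.insertBy, hc]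
          rw [hstep2]
        · rw [List.filter_cons_of_neg hqy, List.filter_cons_of_neg hqy, ihh]
      · rw [if_neg hq] at ihh ⊢
        by_cases hqy : q y
        · rw [List.filter_cons_of_pos hqy, List.filter_cons_of_pos hqy, ihh]
        · rw [List.filter_cons_of_neg hqy, List.filter_cons_of_neg hqy, ihh]

theorem pv_filter_sorted (xs : List (List (String × String))) (q : List (String × String) → Bool) :
    (PySem.List.sorted xs pvK).filter q = PySem.List.sorted (xs.filter q) pvK := by
  have main : ∀ (ys acc : List (List (String × String))),
      acc.Pairwise (fun a b => pvK a ≤ pvK b) →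
      (ys.foldl (fun a x => pvIns x a) acc).filter q
        = (ys.filter q).foldl (fun a x => pvIns x a) (acc.filter q) := by
    intro ys
    induction ys with
    | nil => intro acc h; simp
    | cons x ys ih =>
      intro acc h
      have h2 := pv_pairwise_insertBy x acc h
      simp only [List.foldl_cons]
      rw [ih _ h2, pv_filter_insertBy q x acc h]
      by_cases hq : q x <;> simp [hq]
  rw [PySem.List.sorted_eq_foldl_insertBy, PySem.List.sorted_eq_foldl_insertBy]
  exact main xs [] (by simp)

theorem pv_best_max (t : List (List (String × String))) (c : List (String × String)) :
    pvRk c ≤ pvRk (pvBest c t) ∧ ∀ y ∈ t, pvRk y ≤ pvRk (pvBest c t) := by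
  induction t generalizing c with
  | nil => exact ⟨le_refl _, by intro y hy; simp at hy⟩
  | cons r t ih =>
    have hstep : pvBest c (r :: t) = pvBest (if pvRk c ≤ pvRk r then r else c) t := by
      simp [pvBest]
    set c' := if pvRk c ≤ pvRk r then r else c with hc'
    have h1 : pvRk c ≤ pvRk c' ∧ pvRk r ≤ pvRk c' := by
      by_cases hcr : pvRk c ≤ pvRk r
      · rw [hc', if_pos hcr]; exact ⟨hcr, le_refl _⟩
      · rw [hc', if_neg hcr]; exact ⟨le_refl _, le_of_lt (not_le.mp hcr)⟩
    rcases ih c' with ⟨ha, hb⟩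
    rw [hstep]
    refine ⟨le_trans h1.1 ha, ?_⟩
    intro y hy
    rcases List.mem_cons.mp hy with rfl | hy
    · exact le_trans h1.2 ha
    · exact hb y hy

theorem pv_le_K (a b : List (String × String)) (hp : pvPk a = pvPk b)
    (hr : pvRk a ≤ pvRk b) : pvK a ≤ pvK b :=
  Prod.Lex.le_iff.mpr (Or.inr ⟨hp, hr⟩)

theorem pv_lt_K (a b : List (String × String)) (hp : pvPk a = pvPk b)
    (hr : pvRk a < pvRk b) : pvK a < pvK b :=
  Prod.Lex.lt_iff.mpr (Or.inr ⟨hp, hr⟩)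

theorem pv_lt_K' (a b : List (String × String)) (hp : pvPk a < pvPk b) : pvK a < pvK b :=
  Prod.Lex.lt_iff.mpr (Or.inl hp)

theorem pv_best_mem (t : List (List (String × String))) (c : List (String × String)) :
    pvBest c t = c ∨ pvBest c t ∈ t := by
  induction t generalizing c with
  | nil => exact Or.inl rfl
  | cons r t ih =>
    have hstep : pvBest c (r :: t) = pvBest (if pvRk c ≤ pvRk r then r else c) t := by
      simp [pvBest]
    by_cases hle : pvRk c ≤ pvRk r
    · rw [hstep, if_pos hle]
      rcases ih r with hcase | hcase
      · rw [hcase]; exact Or.inr List.mem_cons_self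
      · exact Or.inr (List.mem_cons_of_mem _ hcase)
    · rw [hstep, if_neg hle]
      rcases ih c with hcase | hcase
      · exact Or.inl hcase
      · exact Or.inr (List.mem_cons_of_mem _ hcase)

theorem pv_getLast?_sorted_run (t : List (List (String × String))) (r : List (String × String))
    (p : String) (h : ∀ y ∈ r :: t, pvPk y = p) :
    (PySem.List.sorted (r :: t) pvK).getLast? = some (pvBest r t) := by
  induction t using List.reverseRecOn with
  | nil => simp [PySem.List.sorted_eq_foldl_insertBy, pvBest, PySem.List.insertBy]
  | append_singleton t x ih =>
    have hsorted : PySem.List.sorted (r :: (t ++ [x])) pvK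
        = pvIns x (PySem.List.sorted (r :: t) pvK) := by
      rw [PySem.List.sorted_eq_foldl_insertBy, PySem.List.sorted_eq_foldl_insertBy]
      rw [show r :: (t ++ [x]) = (r :: t) ++ [x] from rfl, List.foldl_append]
      rfl
    have hxp : pvPk x = p := h x (by simp)
    have hmem : ∀ y ∈ r :: t, pvPk y = p := by
      intro y hy
      apply h y
      simp only [List.mem_cons, List.mem_append] at hy ⊢
      tauto
    have hbm := pv_best_mem t r
    have hbest_mem : pvBest r t ∈ r :: t := by
      rcases hbm with hcase | hcase
      · rw [hcase]; exact List.mem_cons_self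
      · exact List.mem_cons_of_mem _ hcase
    have hmax := pv_best_max t r
    have hallmax : ∀ y ∈ r :: t, pvRk y ≤ pvRk (pvBest r t) := by
      intro y hy
      rcases List.mem_cons.mp hy with rfl | hy
      · exact hmax.1
      · exact hmax.2 y hy
    have hbestp : pvPk (pvBest r t) = p := hmem _ hbest_mem
    have hihb := ih hmem
    have hbeq : pvBest r (t ++ [x]) = if pvRk (pvBest r t) ≤ pvRk x then x else pvBest r t := by
      simp [pvBest, List.foldl_append]
    by_cases hcmp : pvRk (pvBest r t) ≤ pvRk x
    · have hall : ∀ y ∈ PySem.List.sorted (r :: t) pvK, pvBefore x y = false := by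
        intro y hy
        have hy' : y ∈ r :: t := (PySem.List.mem_sorted (r :: t) pvK false y).mp hy
        have hyx : pvK y ≤ pvK x :=
          pv_le_K _ _ (by rw [hmem y hy', hxp]) (le_trans (hallmax y hy') hcmp)
        exact decide_eq_false (not_lt.mpr hyx)
      rw [hsorted, pvIns, PySem.List.insertBy_of_forall_not_before _ _ _ hall]
      rw [List.getLast?_concat, hbeq, if_pos hcmp]
    · rw [hsorted, hbeq, if_neg hcmp]
      apply pv_getLast?_insertBy _ _ _ hihb
      exact decide_eq_true (pv_lt_K _ _ (by rw [hxp, hbestp]) (not_le.mp hcmp))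

theorem pv_foldl_upd (t : List (List (String × String))) (c : List (String × String)) :
    t.foldl pvUpd (some c) = some (pvBest c t) := by
  induction t generalizing c with
  | nil => simp [pvBest]
  | cons r t ih => simp [pvUpd, pvBest, List.foldl_cons, ih]

theorem pv_get?_foldl_aStep (rows : List (List (String × String)))
    (d : PySem.Dict String (List (String × String))) (p : String) :
    (rows.foldl pvAStep d).get? p = (pvSel p rows).foldl pvUpd (d.get? p) := by
  induction rows generalizing d with
  | nil => simp [pvSel]
  | cons r rows ih =>
    simp only [List.foldl_cons]
    rw [ih]
    by_cases hpr : pvPk r = p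
    · have hsel : pvSel p (r :: rows) = r :: pvSel p rows := by
        simp [pvSel, beq_iff_eq.mpr hpr]
      rw [hsel]
      simp only [List.foldl_cons]
      congr 1
      unfold pvAStep
      rw [show pvGet r "parent_part_id" = pvPk r from rfl, hpr]
      cases hdp : d.get? p with
      | none => simp [hdp, pvUpd, PySem.Dict.get?_insert_self]
      | some cur =>
        simp only [hdp, pvOr_eq, pvUpd]
        show (if pvRk cur ≤ pvRk r then d.insert p r else d).get? p
            = some (if pvRk cur ≤ pvRk r then r else cur)
        by_cases hle : pvRk cur ≤ pvRk r
        · rw [if_pos hle, if_pos hle]; simp [PySem.Dict.get?_insert_self]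
        · rw [if_neg hle, if_neg hle, hdp]
    · have hsel : pvSel p (r :: rows) = pvSel p rows := by
        simp only [pvSel, List.filter_cons]
        rw [if_neg (by simp [hpr])]
      rw [hsel]
      congr 1
      unfold pvAStep
      rw [show pvGet r "parent_part_id" = pvPk r from rfl]
      cases hdp : d.get? (pvPk r) with
      | none =>
        simp only [hdp]
        rw [PySem.Dict.get?_insert, if_neg (fun e : p = pvPk r => hpr e.symm)]
      | some cur =>
        simp only [hdp]
        show (if pvOr (pvGet cur "rev") ≤ pvOr (pvGet r "rev")
            then d.insert (pvPk r) r else d).get? p = d.get? p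
        split_ifs
        · rw [PySem.Dict.get?_insert, if_neg (fun e : p = pvPk r => hpr e.symm)]
        · rfl

theorem pv_keys_aStep (d : PySem.Dict String (List (String × String)))
    (r : List (String × String)) (hnd : d.keys.Nodup) :
    (pvAStep d r).keys = PySem.Set.add d.keys (pvPk r) ∧ (pvAStep d r).keys.Nodup := by
  have hmain : pvAStep d r = (match d.get? (pvPk r) with
      | none => d.insert (pvPk r) r
      | some cur =>
          if pvOr (pvGet cur "rev") ≤ pvOr (pvGet r "rev") then d.insert (pvPk r) r
          else d) := rfl
  rw [hmain]
  cases hdp : d.get? (pvPk r) with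
  | none =>
    have hc : d.contains (pvPk r) = false := by
      rw [PySem.Dict.contains_eq_isSome_get?, hdp]; rfl
    have hk : pvPk r ∉ d.keys := fun hm => by
      rw [(PySem.Dict.contains_iff_mem_keys d (pvPk r)).mpr hm] at hc
      simp at hc
    constructor
    · rw [PySem.Dict.keys_insert_of_not_contains _ _ hc]
      simp [PySem.Set.add, PySem.Set.contains, hk]
    · exact PySem.Dict.nodup_keys_insert _ _ _ hnd
  | some cur =>
    simp only [hdp]
    have hc : d.contains (pvPk r) = true := by
      rw [PySem.Dict.contains_eq_isSome_get?, hdp]; rfl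
    have hk : pvPk r ∈ d.keys := (PySem.Dict.contains_iff_mem_keys d (pvPk r)).mp hc
    have hadd : PySem.Set.add d.keys (pvPk r) = d.keys := by
      simp [PySem.Set.add, PySem.Set.contains, hk]
    split_ifs
    · exact ⟨by rw [PySem.Dict.keys_insert_of_contains _ _ hc, hadd],
        PySem.Dict.nodup_keys_insert _ _ _ hnd⟩
    · exact ⟨hadd.symm, hnd⟩

theorem pv_keys_foldl_aStep (rows : List (List (String × String)))
    (d : PySem.Dict String (List (String × String))) (hnd : d.keys.Nodup) :
    (rows.foldl pvAStep d).keys = (rows.map pvPk).foldl PySem.Set.add d.keys ∧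
      (rows.foldl pvAStep d).keys.Nodup := by
  induction rows generalizing d with
  | nil => exact ⟨rfl, hnd⟩
  | cons r rows ih =>
    rcases pv_keys_aStep d r hnd with ⟨hk, hn⟩
    rcases ih (pvAStep d r) hn with ⟨hk2, hn2⟩
    refine ⟨?_, hn2⟩
    simp only [List.foldl_cons, List.map_cons]
    rw [hk2, hk]

theorem pv_foldl_add_cons_fresh (m : List String) (s : List String) (x : String) (h : x ∉ m) :
    m.foldl PySem.Set.add (x :: s) = x :: m.foldl PySem.Set.add s := by
  induction m generalizing s with
  | nil => rfl
  | cons b m' ih =>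
    have hbx : x ≠ b := fun e => h (e ▸ List.mem_cons_self)
    have hxm : x ∉ m' := fun e => h (List.mem_cons_of_mem _ e)
    have hstep : PySem.Set.add (x :: s) b = x :: PySem.Set.add s b := by
      simp only [PySem.Set.add, PySem.Set.contains, List.contains_cons]
      rw [show (b == x) = false from beq_eq_false_iff_ne.mpr (fun e => hbx e.symm)]
      simp only [Bool.false_or]
      split_ifs <;> rfl
    simp only [List.foldl_cons, hstep]
    exact ih _ hxm

theorem pv_ofList_cons_of_not_mem (m : List String) (x : String) (h : x ∉ m) :
    PySem.Set.ofList (x :: m) = x :: PySem.Set.ofList m := by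
  show (x :: m).foldl PySem.Set.add PySem.Set.empty = x :: m.foldl PySem.Set.add PySem.Set.empty
  rw [List.foldl_cons]
  rw [show PySem.Set.add PySem.Set.empty x = x :: PySem.Set.empty from rfl]
  exact pv_foldl_add_cons_fresh m _ x h

theorem pv_ofList_cons_dup (m : List String) (x : String) :
    PySem.Set.ofList (x :: x :: m) = PySem.Set.ofList (x :: m) := by
  show (x :: x :: m).foldl PySem.Set.add PySem.Set.empty
      = (x :: m).foldl PySem.Set.add PySem.Set.empty
  simp only [List.foldl_cons]
  congr 1
  simp [PySem.Set.add, PySem.Set.contains]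

theorem pv_bGroup_strict (t : List (List (String × String))) (r : List (String × String))
    (h : (r :: t).Pairwise (fun a b => pvPk a ≤ pvPk b)) :
    (pvBGroup r t).Pairwise (fun a b => pvPk a < pvPk b) ∧
      ∀ x ∈ pvBGroup r t, pvPk r ≤ pvPk x := by
  induction t generalizing r with
  | nil =>
    refine ⟨List.pairwise_singleton _ _, ?_⟩
    intro x hx
    simp only [pvBGroup, List.mem_singleton] at hx
    exact hx ▸ le_refl _
  | cons s t ih =>
    rcases List.pairwise_cons.mp h with ⟨hr, hst⟩
    by_cases hps : pvPk s = pvPk r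
    · rw [pvBGroup, if_pos hps]
      rcases ih s hst with ⟨hp, hmem⟩
      exact ⟨hp, fun x hx => hps ▸ hmem x hx⟩
    · rw [pvBGroup, if_neg hps]
      rcases ih s hst with ⟨hp, hmem⟩
      have hrs : pvPk r < pvPk s := lt_of_le_of_ne (hr s (by simp)) (fun e => hps e.symm)
      constructor
      · refine List.pairwise_cons.mpr ⟨?_, hp⟩
        intro b hb
        exact lt_of_lt_of_le hrs (hmem b hb)
      · intro x hx
        rcases List.mem_cons.mp hx with rfl | hx
        · exact le_refl _
        · exact le_trans (le_of_lt hrs) (hmem x hx)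

theorem pv_bGroup_eq_map (t : List (List (String × String))) (r : List (String × String))
    (h : (r :: t).Pairwise (fun a b => pvPk a ≤ pvPk b)) :
    pvBGroup r t = (PySem.Set.ofList ((r :: t).map pvPk)).map
      (fun p => (((r :: t).filter (fun x => pvPk x == p)).getLast?).getD []) := by
  induction t generalizing r with
  | nil =>
    show [r] = _
    rw [List.map_cons, List.map_nil]
    rw [show PySem.Set.ofList [pvPk r] = [pvPk r] from rfl]
    rw [List.map_cons, List.map_nil]
    rw [List.filter_cons_of_pos (by simp), List.filter_nil]
    rfl
  | cons s t ih =>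
    rcases List.pairwise_cons.mp h with ⟨hr, hst⟩
    by_cases hps : pvPk s = pvPk r
    · rw [pvBGroup, if_pos hps, ih s hst]
      have hsets : PySem.Set.ofList ((r :: s :: t).map pvPk)
          = PySem.Set.ofList ((s :: t).map pvPk) := by
        simp only [List.map_cons]
        rw [hps, pv_ofList_cons_dup]
      rw [hsets]
      apply List.map_congr_left
      intro p hp
      have hpmem : p ∈ (s :: t).map pvPk := (PySem.Set.mem_ofList _ _).mp hp
      by_cases hpr : pvPk r = p
      · have h1 : (r :: s :: t).filter (fun x => pvPk x == p)
            = r :: (s :: t).filter (fun x => pvPk x == p) :=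
          List.filter_cons_of_pos (by simp [hpr])
        have h2 : (s :: t).filter (fun x => pvPk x == p)
            = s :: t.filter (fun x => pvPk x == p) :=
          List.filter_cons_of_pos (by simp [hps.trans hpr])
        rw [h1, h2, List.getLast?_cons_cons]
      · have h1 : (r :: s :: t).filter (fun x => pvPk x == p)
            = (s :: t).filter (fun x => pvPk x == p) :=
          List.filter_cons_of_neg (by simp [hpr])
        rw [h1]
    · rw [pvBGroup, if_neg hps, ih s hst]
      have hrs : pvPk r < pvPk s := lt_of_le_of_ne (hr s (by simp)) (fun e => hps e.symm)
      rcases List.pairwise_cons.mp hst with ⟨hs2, _⟩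
      have hfresh : pvPk r ∉ (s :: t).map pvPk := by
        intro hmem
        rcases List.mem_map.mp hmem with ⟨y, hy, hyp⟩
        rcases List.mem_cons.mp hy with rfl | hy
        · exact hps hyp
        · have hle : pvPk s ≤ pvPk y := hs2 y hy
          rw [hyp] at hle
          exact absurd hle (not_le.mpr hrs)
      simp only [List.map_cons]
      have hof : PySem.Set.ofList (pvPk r :: pvPk s :: List.map pvPk t)
          = pvPk r :: PySem.Set.ofList (pvPk s :: List.map pvPk t) :=
        pv_ofList_cons_of_not_mem _ _ (by simpa using hfresh)
      rw [hof, List.map_cons]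
      congr 1
      · have h1 : (r :: s :: t).filter (fun x => pvPk x == pvPk r)
            = r :: (s :: t).filter (fun x => pvPk x == pvPk r) :=
          List.filter_cons_of_pos (by simp)
        rw [h1]
        have hnil : (s :: t).filter (fun x => pvPk x == pvPk r) = [] := by
          rw [List.filter_eq_nil_iff]
          intro y hy hbeq
          exact hfresh (List.mem_map.mpr ⟨y, hy, beq_iff_eq.mp hbeq⟩)
        rw [hnil]
        rfl
      · apply List.map_congr_left
        intro p hp
        have hpr : pvPk r ≠ p := by
          intro e
          exact hfresh (e ▸ (PySem.Set.mem_ofList _ _).mp hp)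
        have h1 : (r :: s :: t).filter (fun x => pvPk x == p)
            = (s :: t).filter (fun x => pvPk x == p) :=
          List.filter_cons_of_neg (by simp [hpr])
        rw [h1]

theorem pv_foldl_bStep (t : List (List (String × String)))
    (acc : List (List (String × String))) (r : List (String × String)) :
    t.foldl pvBStep (acc ++ [r]) = acc ++ pvBGroup r t := by
  induction t generalizing acc r with
  | nil => simp [pvBGroup]
  | cons s t ih =>
    have hstep : pvBStep (acc ++ [r]) s =
        if pvPk s = pvPk r then acc ++ [s] else (acc ++ [r]) ++ [s] := by
      simp only [pvBStep, List.getLast?_concat, List.dropLast_concat]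
      by_cases hps : pvPk s = pvPk r
      · rw [if_pos (by simpa [pvPk] using (beq_iff_eq.mpr hps.symm)), if_pos hps]
      · rw [if_neg ?_, if_neg hps]
        simp only [beq_iff_eq]
        exact fun hh => hps (by simpa [pvPk] using hh.symm)
    simp only [List.foldl_cons, hstep]
    by_cases hps : pvPk s = pvPk r
    · rw [if_pos hps, ih, pvBGroup, if_pos hps]
    · rw [if_neg hps, ih, pvBGroup, if_neg hps]
      simp

theorem pv_sorted_pairwise_pk (xs : List (List (String × String))) :
    (PySem.List.sorted xs pvK).Pairwise (fun a b => pvPk a ≤ pvPk b) := by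
  refine (PySem.List.sorted_pairwise xs pvK).imp ?_
  intro a b hab
  rcases Prod.Lex.le_iff.mp hab with hlt | ⟨heq, _⟩
  · exact le_of_lt hlt
  · exact le_of_eq heq

-- ===== VERDICT (by name: the statement is the Claim_ definition above) =====
theorem latest_only_py_spec : Claim_equal_latest_only_py := by
  intro rows _
  show latest_only_py rows = latest_only_py_alt rows
  show PySem.List.sorted2 ((rows.foldl pvAStep PySem.Dict.empty).values)
        (fun x => pvGet x "parent_part_id") (fun x => pvGet x "rev")
      = (PySem.List.sorted2 rows (fun r => pvGet r "parent_part_id")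
          (fun r => pvGet r "rev")).foldl pvBStep []
  rw [pv_sorted2_eq, pv_sorted2_eq]
  show PySem.List.sorted ((rows.foldl pvAStep PySem.Dict.empty).values) pvK
      = (PySem.List.sorted rows pvK).foldl pvBStep []
  have hpw : (PySem.List.sorted rows pvK).Pairwise (fun a b => pvPk a ≤ pvPk b) :=
    pv_sorted_pairwise_pk rows
  cases hS : PySem.List.sorted rows pvK with
  | nil =>
    have hrows : rows = [] := (PySem.List.sorted_eq_nil_iff rows pvK false).mp hS
    subst hrows
    rfl
  | cons r t =>
    have hpw' : (r :: t).Pairwise (fun a b => pvPk a ≤ pvPk b) := hS ▸ hpw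
    have hRHS : (r :: t).foldl pvBStep [] = pvBGroup r t := by
      show List.foldl pvBStep (pvBStep [] r) t = _
      rw [show pvBStep [] r = [] ++ [r] from rfl, pv_foldl_bStep t [] r]
      simp
    have hB := pv_bGroup_eq_map t r hpw'
    have hkeys := pv_keys_foldl_aStep rows PySem.Dict.empty List.nodup_nil
    set d := rows.foldl pvAStep PySem.Dict.empty with hd
    have hknd : d.keys.Nodup := hkeys.2
    have hkeq2 : d.keys = PySem.Set.ofList (rows.map pvPk) := hkeys.1
    have hvals : d.values = d.keys.map (fun k => d.getD k []) :=
      PySem.Dict.values_eq_map_keys d hknd []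
    have hgetD : ∀ p, d.getD p [] = pvBestO (pvSel p rows) := by
      intro p
      rw [PySem.Dict.getD_eq_get?_getD, hd, pv_get?_foldl_aStep]
      rfl
    have hc : ∀ p ∈ PySem.Set.ofList ((r :: t).map pvPk),
        (((r :: t).filter (fun x => pvPk x == p)).getLast?).getD [] = pvBestO (pvSel p rows) := by
      intro p hp
      have hpm : p ∈ (r :: t).map pvPk := (PySem.Set.mem_ofList _ _).mp hp
      have hfil : (r :: t).filter (fun x => pvPk x == p)
          = PySem.List.sorted (pvSel p rows) pvK := by
        rw [← hS]
        exact pv_filter_sorted rows _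
      obtain ⟨y, hy, hyp⟩ := List.mem_map.mp hpm
      have hyrows : y ∈ rows := by
        have hys : y ∈ PySem.List.sorted rows pvK := hS ▸ hy
        exact (PySem.List.mem_sorted rows pvK false y).mp hys
      have hysel : y ∈ pvSel p rows := List.mem_filter.mpr ⟨hyrows, by simp [hyp]⟩
      cases hsel : pvSel p rows with
      | nil => rw [hsel] at hysel; simp at hysel
      | cons r0 t0 =>
        have hallp : ∀ z ∈ r0 :: t0, pvPk z = p := by
          intro z hz
          have hz2 : z ∈ pvSel p rows := hsel ▸ hz
          have hz3 := (List.mem_filter.mp hz2).2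
          simpa using hz3
        rw [hfil, hsel, pv_getLast?_sorted_run t0 r0 p hallp]
        rw [show pvBestO (r0 :: t0) = (t0.foldl pvUpd (some r0)).getD [] from rfl, pv_foldl_upd]
    have hBmap : pvBGroup r t
        = (PySem.Set.ofList ((r :: t).map pvPk)).map (fun p => pvBestO (pvSel p rows)) := by
      rw [hB]
      exact List.map_congr_left hc
    have hperm : (PySem.Set.ofList ((r :: t).map pvPk)).Perm (PySem.Set.ofList (rows.map pvPk)) := by
      rw [List.perm_ext_iff_of_nodup (PySem.Set.nodup_ofList _) (PySem.Set.nodup_ofList _)]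
      intro a
      rw [PySem.Set.mem_ofList, PySem.Set.mem_ofList]
      constructor <;> intro ha
      · obtain ⟨y, hy, hyp⟩ := List.mem_map.mp ha
        exact List.mem_map.mpr ⟨y, (PySem.List.mem_sorted rows pvK false y).mp (hS ▸ hy), hyp⟩
      · obtain ⟨y, hy, hyp⟩ := List.mem_map.mp ha
        exact List.mem_map.mpr ⟨y, hS ▸ ((PySem.List.mem_sorted rows pvK false y).mpr hy), hyp⟩
    have hstrict : (pvBGroup r t).Pairwise (fun a b => pvK a < pvK b) :=
      ((pv_bGroup_strict t r hpw').1).imp (fun hab => pv_lt_K' _ _ hab)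
    have hVeq : d.values
        = (PySem.Set.ofList (rows.map pvPk)).map (fun p => pvBestO (pvSel p rows)) := by
      rw [hvals, hkeq2]
      exact List.map_congr_left (fun p _ => hgetD p)
    have hperm2 : (pvBGroup r t).Perm d.values := by
      rw [hVeq, hBmap]
      exact hperm.map _
    rw [hRHS]
    exact PySem.List.sorted_eq_of_perm_of_pairwise_lt d.values (pvBGroup r t) pvK hperm2 hstrict
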